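-- pv_equiv track=rewrite | github.com/Luckydog666liguan/DouZero-main | douzero/env/hu_pattern_detector.py | _is_six_two_adjacent
-- ===== SOURCE A (Python) =====
-- def _is_six_two_adjacent(cards):
--     """判断是否是6+2相邻的组合"""
--     point_counts = {}
--     for card in cards:
--         point_counts[card[0]] = point_counts.get(card[0], 0) + 1
--
--     for point in range(6, 14):
--         if (point_counts.get(point, 0) == 6 and point_counts.get(point + 1, 0) == 2) or \
--            (point_counts.get(point, 0) == 2 and point_counts.get(point + 1, 0) == 6):
--             return True
--     return False
-- ===== SOURCE B (Python) =====
-- def _is_six_two_adjacent(cards):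
--     """判断是否是6+2相邻的组合 — derive the six/two point sets once, then check neighbours by set membership."""
--     counts = {}
--     for card in cards:
--         counts[card[0]] = counts.get(card[0], 0) + 1
--     sixes = {p for p, c in counts.items() if c == 6}
--     twos = {p for p, c in counts.items() if c == 2}
--     return any((6 <= q <= 13 and q + 1 in twos) or
--                (7 <= q <= 14 and q - 1 in twos) for q in sixes)
-- ===== Notes on version B (the rewrite author's own statement) =====
-- stated objective: alternative
-- what changed: Instead of scanning the fixed point range 6..13 with paired count comparisons, B derives the sets of points with count 6 and count 2 from the counter and returns whether any six-point has an in-window two-neighbour via set membership.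
import Mathlib
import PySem

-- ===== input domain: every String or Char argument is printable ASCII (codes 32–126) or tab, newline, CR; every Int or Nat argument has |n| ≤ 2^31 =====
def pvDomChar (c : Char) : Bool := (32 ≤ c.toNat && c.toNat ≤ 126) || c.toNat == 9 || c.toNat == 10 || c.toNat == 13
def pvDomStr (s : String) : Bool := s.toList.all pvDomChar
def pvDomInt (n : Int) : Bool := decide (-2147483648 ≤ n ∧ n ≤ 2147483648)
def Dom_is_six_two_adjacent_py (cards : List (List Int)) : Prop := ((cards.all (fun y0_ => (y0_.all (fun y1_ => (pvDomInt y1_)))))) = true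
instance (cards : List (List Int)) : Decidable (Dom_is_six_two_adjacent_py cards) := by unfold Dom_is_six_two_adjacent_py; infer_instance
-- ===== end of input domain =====

-- B replaces A's fixed scan over points 6..13 by deriving the count-6 and count-2 point sets
-- from the counter and checking in-window neighbours by set membership (objective: alternative).

-- the counting loop both Pythons begin with ('point_counts[card[0]] = point_counts.get(card[0], 0) + 1');
-- card[0] is ported as pyGetD card 0 0: Pre_ guarantees every card is nonempty, exactly where card[0] returns.
def pvCounts (cards : List (List Int)) : PySem.Dict Int Int :=
  cards.foldl (fun d card => d.modify (PySem.List.pyGetD card 0 0) 0 (· + 1))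
    (PySem.Dict.empty : PySem.Dict Int Int)

-- ===== PORT A =====
def is_six_two_adjacent_py (cards : List (List Int)) : Bool :=
  let point_counts := pvCounts cards
  (PySem.List.pyRange 6 14 1).any (fun point =>
    (point_counts.getD point 0 == 6 && point_counts.getD (point + 1) 0 == 2) ||
    (point_counts.getD point 0 == 2 && point_counts.getD (point + 1) 0 == 6))

-- ===== PORT B =====
def is_six_two_adjacent_py_alt (cards : List (List Int)) : Bool :=
  let counts := pvCounts cards
  let sixes : PySem.Set Int := PySem.Set.ofList ((counts.items.filter (fun pc => pc.2 == 6)).map (·.1))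
  let twos : PySem.Set Int := PySem.Set.ofList ((counts.items.filter (fun pc => pc.2 == 2)).map (·.1))
  sixes.any (fun q =>
    (decide (6 ≤ q) && decide (q ≤ 13) && PySem.Set.contains twos (q + 1)) ||
    (decide (7 ≤ q) && decide (q ≤ 14) && PySem.Set.contains twos (q - 1)))

-- ===== PRECONDITION & SPEC =====
-- Pre_ excludes exactly the inputs containing an empty card, where Python's card[0] raises IndexError (in A and in B alike).
def Pre_is_six_two_adjacent_py (cards : List (List Int)) : Prop := ∀ card ∈ cards, card ≠ []
instance (cards : List (List Int)) : Decidable (Pre_is_six_two_adjacent_py cards) := by unfold Pre_is_six_two_adjacent_py; infer_instance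

def pvWitness_is_six_two_adjacent_py : List (List Int) := [[7, 1], [7, 2], [8, 0]]

def Spec_is_six_two_adjacent_py (cards : List (List Int)) (out : Bool) : Prop := out = is_six_two_adjacent_py_alt cards
instance (cards : List (List Int)) (out : Bool) : Decidable (Spec_is_six_two_adjacent_py cards out) := by unfold Spec_is_six_two_adjacent_py; infer_instance

-- ===== CLAIM (what is proved, stated in full; the proofs are below) =====
def Claim_equal_is_six_two_adjacent_py : Prop := ∀ (cards : List (List Int)), Dom_is_six_two_adjacent_py cards → Pre_is_six_two_adjacent_py cards → Spec_is_six_two_adjacent_py cards (is_six_two_adjacent_py cards)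

-- ===== LEMMAS AND PROOFS =====

theorem pvCounts_nodup (cards : List (List Int)) : (pvCounts cards).keys.Nodup := by
  unfold pvCounts
  exact PySem.Dict.nodup_keys_foldl_modify_key cards (fun card => PySem.List.pyGetD card 0 0) 0
    (fun _ _ => (· + 1)) _ PySem.Dict.nodup_keys_empty

-- membership in B's derived sets ↔ a count equation (for t ≠ 0, so membership forces presence)
theorem pvMem_filter_set (cards : List (List Int)) (t q : Int) (ht : t ≠ 0) :
    q ∈ PySem.Set.ofList (((pvCounts cards).items.filter (fun pc => pc.2 == t)).map (·.1)) ↔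
      (pvCounts cards).getD q 0 = t := by
  rw [PySem.Set.mem_ofList, List.mem_map]
  constructor
  · rintro ⟨⟨k, v⟩, hmem, rfl⟩
    rw [List.mem_filter] at hmem
    obtain ⟨hitems, hv⟩ := hmem
    rw [PySem.Dict.getD_of_mem_items (pvCounts cards) hitems (pvCounts_nodup cards) 0]
    exact beq_iff_eq.1 hv
  · intro h
    have hc : (pvCounts cards).contains q = true := by
      by_contra hnc
      rw [PySem.Dict.getD_of_not_contains (pvCounts cards) 0 (Bool.eq_false_iff.2 hnc)] at h
      exact ht h.symm
    refine ⟨(q, t), ?_, rfl⟩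
    rw [List.mem_filter]
    refine ⟨?_, by simp⟩
    rw [PySem.Dict.items_eq_map_keys (pvCounts cards) (pvCounts_nodup cards) 0, List.mem_map]
    exact ⟨q, (PySem.Dict.contains_iff_mem_keys _ _).1 hc, by rw [h]⟩

theorem pv_main (cards : List (List Int)) :
    is_six_two_adjacent_py cards = is_six_two_adjacent_py_alt cards := by
  unfold is_six_two_adjacent_py is_six_two_adjacent_py_alt
  rw [Bool.eq_iff_iff, List.any_eq_true, List.any_eq_true]
  constructor
  · rintro ⟨p, hp, hcond⟩
    rw [PySem.List.mem_pyRange_one] at hp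
    simp only [Bool.or_eq_true, Bool.and_eq_true, beq_iff_eq] at hcond
    rcases hcond with ⟨h6, h2⟩ | ⟨h2, h6⟩
    · refine ⟨p, (pvMem_filter_set cards 6 p (by norm_num)).2 h6, ?_⟩
      simp only [Bool.or_eq_true, Bool.and_eq_true, decide_eq_true_eq]
      refine Or.inl ⟨⟨by omega, by omega⟩, ?_⟩
      rw [PySem.Set.contains_iff]
      exact (pvMem_filter_set cards 2 (p + 1) (by norm_num)).2 h2
    · refine ⟨p + 1, (pvMem_filter_set cards 6 (p + 1) (by norm_num)).2 h6, ?_⟩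
      simp only [Bool.or_eq_true, Bool.and_eq_true, decide_eq_true_eq]
      refine Or.inr ⟨⟨by omega, by omega⟩, ?_⟩
      rw [PySem.Set.contains_iff]
      have hpp : p + 1 - 1 = p := by ring
      rw [hpp]
      exact (pvMem_filter_set cards 2 p (by norm_num)).2 h2
  · rintro ⟨q, hq, hcond⟩
    have h6 := (pvMem_filter_set cards 6 q (by norm_num)).1 hq
    simp only [Bool.or_eq_true, Bool.and_eq_true, decide_eq_true_eq] at hcond
    rcases hcond with ⟨⟨hl, hr⟩, htwo⟩ | ⟨⟨hl, hr⟩, htwo⟩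
    · rw [PySem.Set.contains_iff] at htwo
      have h2 := (pvMem_filter_set cards 2 (q + 1) (by norm_num)).1 htwo
      exact ⟨q, PySem.List.mem_pyRange_one.2 ⟨by omega, by omega⟩, by simp [h6, h2]⟩
    · rw [PySem.Set.contains_iff] at htwo
      have h2 := (pvMem_filter_set cards 2 (q - 1) (by norm_num)).1 htwo
      refine ⟨q - 1, PySem.List.mem_pyRange_one.2 ⟨by omega, by omega⟩, ?_⟩
      have hqq : q - 1 + 1 = q := by ring
      simp [hqq, h6, h2]

-- ===== VERDICT (by name: the statement is the Claim_ definition above) =====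
theorem is_six_two_adjacent_py_spec : Claim_equal_is_six_two_adjacent_py := by
  intro cards _ _
  unfold Spec_is_six_two_adjacent_py
  exact pv_main cards
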